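-- pv_equiv track=rewrite | github.com/learnore/helloshen | z_huawei_od/24_od/python/100/2.py | find_minimum_swap
-- ===== SOURCE A (Python) =====
-- def find_minimum_swap(A, B):
--     A.sort()        # 题目要求A中最小的进行交换，将list数据排序
--
--     total_difference = sum(A) - sum(B)      # 计算2个CPU合力之差
--
--     b_set = set(B)          # 将 list(B) set化
--     for a_cpu in A:
--         target_b_cpu = a_cpu - (total_difference // 2)
--         if target_b_cpu in b_set:
--             return a_cpu, target_b_cpu
--
--     """
--     # 等式： (a_cpu - b_cpu) *2 = total_difference
--     # 从A中取一个数，从B中取一个数，2数只差的2备，是sum之差，则就选这两个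
--     """
-- ===== SOURCE B (Python) =====
-- def find_minimum_swap(A, B):
--     A.sort()  # kept: caller-visible in-place mutation of A (return value does not need it)
--     delta = (sum(A) - sum(B)) // 2
--     a_values = set(A)
--     best = None
--     for b_cpu in B:
--         candidate = b_cpu + delta
--         if candidate in a_values and (best is None or candidate < best):
--             best = candidate
--     if best is not None:
--         return best, best - delta
-- ===== Notes on version B (the rewrite author's own statement) =====
-- stated objective: alternative
-- what changed: Instead of scanning sorted A front-to-back for the first hit against set(B), B scans B once, maps each b to its candidate a = b + (sum(A)-sum(B))//2, tests membership in set(A) and keeps the minimum candidate; A.sort() is kept only for its caller-visible mutation.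
import Mathlib
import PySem

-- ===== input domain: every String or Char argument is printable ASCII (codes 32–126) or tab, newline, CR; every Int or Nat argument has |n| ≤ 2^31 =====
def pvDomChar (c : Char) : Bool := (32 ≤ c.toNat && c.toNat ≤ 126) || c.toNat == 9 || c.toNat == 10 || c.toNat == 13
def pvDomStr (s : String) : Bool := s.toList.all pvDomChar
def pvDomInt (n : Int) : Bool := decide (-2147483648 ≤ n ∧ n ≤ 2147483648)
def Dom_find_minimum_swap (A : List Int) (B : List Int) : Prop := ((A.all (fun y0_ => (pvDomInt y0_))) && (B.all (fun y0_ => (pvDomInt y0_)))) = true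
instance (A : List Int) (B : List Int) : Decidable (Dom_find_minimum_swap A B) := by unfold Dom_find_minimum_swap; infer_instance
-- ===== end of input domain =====

-- B re-derives the same minimal pair by scanning B for candidates b + delta against set(A)
-- and tracking the minimum, instead of A's first-hit scan of sorted A against set(B);
-- A.sort()'s in-place mutation of A is preserved in Source B but only the return value is proved equal.


-- ===== PORT A =====
-- the 'for a_cpu in A: … return' loop of A
def pvFirstHit (d : Int) (bset : List Int) : List Int → Option (Int × Int)
  | [] => none
  | a :: rest =>
      if a - d ∈ bset then some (a, a - d) else pvFirstHit d bset rest

def find_minimum_swap (A : List Int) (B : List Int) : Option (Int × Int) :=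
  let As := PySem.List.sorted A (fun x => x) false      -- A.sort()
  let total_difference := As.sum - B.sum
  let bset : PySem.Set Int := PySem.Set.ofList B
  pvFirstHit (PySem.Int.floordiv total_difference 2) bset As

-- ===== PORT B =====
-- the loop body of Source B: keep the smaller of best and candidate when candidate ∈ set(A)
def pvTrackMin (aset : List Int) (best : Option Int) (cand : Int) : Option Int :=
  if cand ∈ aset then
    match best with
    | none => some cand
    | some m => if cand < m then some cand else some m
  else best

def find_minimum_swap_alt (A : List Int) (B : List Int) : Option (Int × Int) :=
  let As := PySem.List.sorted A (fun x => x) false      -- A.sort() (caller-visible mutation)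
  let delta := PySem.Int.floordiv (As.sum - B.sum) 2
  let aset : PySem.Set Int := PySem.Set.ofList As
  match B.foldl (fun best b => pvTrackMin aset best (b + delta)) none with
  | some m => some (m, m - delta)
  | none => none

-- ===== PRECONDITION & SPEC =====
def Spec_find_minimum_swap (A : List Int) (B : List Int) (out : Option (Int × Int)) : Prop := out = find_minimum_swap_alt A B
instance (A : List Int) (B : List Int) (out : Option (Int × Int)) : Decidable (Spec_find_minimum_swap A B out) := by unfold Spec_find_minimum_swap; infer_instance

-- ===== CLAIM (what is proved, stated in full; the proofs are below) =====
def Claim_equal_find_minimum_swap : Prop := ∀ (A : List Int) (B : List Int), Dom_find_minimum_swap A B → Spec_find_minimum_swap A B (find_minimum_swap A B)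

-- ===== LEMMAS AND PROOFS =====

lemma firstHit_none_iff (d : Int) (bs : List Int) (l : List Int) :
    pvFirstHit d bs l = none ↔ ∀ a ∈ l, a - d ∉ bs := by
  induction l with
  | nil => simp [pvFirstHit]
  | cons a t ih =>
      by_cases h : a - d ∈ bs <;> simp [pvFirstHit, h, ih]

lemma firstHit_some (d : Int) (bs : List Int) (l : List Int)
    (hs : l.Pairwise (· ≤ ·)) {m t : Int}
    (h : pvFirstHit d bs l = some (m, t)) :
    t = m - d ∧ m ∈ l ∧ m - d ∈ bs ∧ ∀ a ∈ l, a - d ∈ bs → m ≤ a := by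
  induction l with
  | nil => simp [pvFirstHit] at h
  | cons a rest ih =>
      rw [List.pairwise_cons] at hs
      by_cases hc : a - d ∈ bs
      · simp [pvFirstHit, hc] at h
        obtain ⟨hm, ht⟩ := h
        subst hm; subst ht
        refine ⟨rfl, List.mem_cons_self, hc, ?_⟩
        intro x hx _
        rcases List.mem_cons.mp hx with rfl | hx
        · exact le_refl _
        · exact hs.1 x hx
      · simp only [pvFirstHit, if_neg hc] at h
        obtain ⟨ht, hmem, hb, hmin⟩ := ih hs.2 h
        refine ⟨ht, List.mem_cons_of_mem _ hmem, hb, ?_⟩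
        intro x hx hxb
        rcases List.mem_cons.mp hx with rfl | hx
        · exact absurd hxb hc
        · exact hmin x hx hxb

-- candidates of Source B's loop, as a list
def pvCands (aset : List Int) (d : Int) (bs : List Int) : List Int :=
  (bs.map (· + d)).filter (fun c => decide (c ∈ aset))

def pvOptList : Option Int → List Int
  | none => []
  | some m => [m]

lemma trackMin_eq (aset : List Int) (acc : Option Int) (c : Int) :
    pvTrackMin aset acc c =
      if c ∈ aset then some (match acc with | none => c | some m => min m c) else acc := by
  cases acc with
  | none => rfl
  | some m =>
      by_cases hc : c ∈ aset
      · simp only [pvTrackMin, if_pos hc]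
        rcases lt_or_ge c m with h | h
        · simp [if_pos h, min_eq_right h.le]
        · simp [if_neg (not_lt.mpr h), min_eq_left h]
      · simp [pvTrackMin, hc]

lemma foldl_track (aset : List Int) (d : Int) (bs : List Int) :
    ∀ acc : Option Int,
      bs.foldl (fun best b => pvTrackMin aset best (b + d)) acc
        = (pvOptList acc ++ pvCands aset d bs).min? := by
  induction bs with
  | nil =>
      intro acc; cases acc <;> simp [pvCands, pvOptList, List.min?]
  | cons b t ih =>
      intro acc
      simp only [List.foldl_cons]
      rw [ih, trackMin_eq]
      by_cases hc : b + d ∈ aset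
      · rw [if_pos hc]
        cases acc with
        | none => simp [pvCands, pvOptList, hc]
        | some m =>
            simp only [pvCands, pvOptList, List.map_cons, List.filter_cons,
              decide_eq_true_eq, hc, if_pos]
            simp [List.min?]
      · rw [if_neg hc]
        simp [pvCands, hc]

lemma mem_cands (aset : List Int) (d : Int) (bs : List Int) (m : Int) :
    m ∈ pvCands aset d bs ↔ (∃ b ∈ bs, m = b + d) ∧ m ∈ aset := by
  simp only [pvCands, List.mem_filter, List.mem_map, decide_eq_true_eq]
  constructor
  · rintro ⟨⟨b, hb, rfl⟩, h2⟩; exact ⟨⟨b, hb, rfl⟩, h2⟩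
  · rintro ⟨⟨b, hb, rfl⟩, h2⟩; exact ⟨⟨b, hb, rfl⟩, h2⟩

-- ===== VERDICT (by name: the statement is the Claim_ definition above) =====
theorem find_minimum_swap_spec : Claim_equal_find_minimum_swap := by
  intro A B _
  unfold Spec_find_minimum_swap find_minimum_swap find_minimum_swap_alt
  simp only []
  set As := PySem.List.sorted A (fun x => x) false with hAs
  set d := PySem.Int.floordiv (As.sum - B.sum) 2 with hd
  have hpair : As.Pairwise (· ≤ ·) := PySem.List.sorted_pairwise A (fun x => x)
  have hmemA : ∀ x : Int, x ∈ PySem.Set.ofList As ↔ x ∈ As := fun x => PySem.Set.mem_ofList _ _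
  have hmemB : ∀ x : Int, x ∈ PySem.Set.ofList B ↔ x ∈ B := fun x => PySem.Set.mem_ofList _ _
  rw [foldl_track]
  rcases hmin : (pvOptList none ++ pvCands (PySem.Set.ofList As) d B).min? with _ | m
  · -- no candidate: first-hit must also fail
    rw [List.min?_eq_none_iff] at hmin
    simp only [pvOptList, List.nil_append] at hmin
    rw [firstHit_none_iff]
    intro a ha hb
    have : a ∈ pvCands (PySem.Set.ofList As) d B := by
      rw [mem_cands]
      exact ⟨⟨a - d, (hmemB _).mp hb, by ring⟩, (hmemA _).mpr ha⟩
    rw [hmin] at this; exact absurd this (List.not_mem_nil)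
  · -- minimum candidate m: first-hit returns exactly (m, m - d)
    simp only [pvOptList, List.nil_append] at hmin
    obtain ⟨hmem, hle⟩ := List.min?_eq_some_iff.mp hmin
    rw [mem_cands] at hmem
    obtain ⟨⟨b0, hb0, rfl⟩, hmaset⟩ := hmem
    have hmAs : b0 + d ∈ As := (hmemA _).mp hmaset
    have hmBb : b0 + d - d ∈ PySem.Set.ofList B := by
      rw [hmemB]; simpa using hb0
    -- firstHit is not none
    rcases hfh : pvFirstHit d (PySem.Set.ofList B) As with _ | ⟨m', t⟩
    · rw [firstHit_none_iff] at hfh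
      exact absurd hmBb (hfh _ hmAs)
    · obtain ⟨ht, hm'As, hm'B, hm'min⟩ := firstHit_some d _ As hpair hfh
      have h1 : m' ≤ b0 + d := hm'min _ hmAs hmBb
      have h2 : b0 + d ≤ m' := by
        apply hle
        rw [mem_cands]
        exact ⟨⟨m' - d, (hmemB _).mp hm'B, by ring⟩, (hmemA _).mpr hm'As⟩
      have : m' = b0 + d := le_antisymm h1 h2
      subst this; subst ht; rfl
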